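-- pv_equiv track=rewrite | github.com/eventhorizn/projects | adventOfCode/2015/day_3/main.py | part_one
-- ===== SOURCE A (Python) =====
-- def part_one(moves: list[str]):
--     loc_x = 1
--     loc_y = 1
--     key = (loc_x, loc_x)
--     visited = {key: 1}
--
--     for move in moves:
--         # north
--         if move == '^':
--             loc_y += 1
--         # south
--         if move == 'v':
--             loc_y -= 1
--         # east
--         if move == '>':
--             loc_x += 1
--         # west
--         if move == '<':
--             loc_x -= 1
--
--         key = (loc_x, loc_y)
--         if key in visited:
--             visited[key] += 1
--         else:
--             visited[key] = 1
--
--     return len(visited)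
-- ===== SOURCE B (Python) =====
-- def part_one(moves: list[str]):
--     step = {'^': (0, 1), 'v': (0, -1), '>': (1, 0), '<': (-1, 0)}
--     deltas = [step.get(m, (0, 0)) for m in moves]
--     pts = [(1, 1)]
--     for dx, dy in deltas:
--         pts.append((pts[-1][0] + dx, pts[-1][1] + dy))
--     pts = sorted(pts)
--     return 1 + sum(1 for p, q in zip(pts, pts[1:]) if p != q)
-- ===== Notes on version B (the rewrite author's own statement) =====
-- stated objective: alternative
-- what changed: Replaces A's incremental visit-count dict (per-step if-chain plus key-presence branching) by a delta lookup table, materialising the whole position sequence, then sorting it and counting run boundaries (adjacent differing pairs) to get the distinct count -- no dict or set of positions is maintained at all.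
import Mathlib
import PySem

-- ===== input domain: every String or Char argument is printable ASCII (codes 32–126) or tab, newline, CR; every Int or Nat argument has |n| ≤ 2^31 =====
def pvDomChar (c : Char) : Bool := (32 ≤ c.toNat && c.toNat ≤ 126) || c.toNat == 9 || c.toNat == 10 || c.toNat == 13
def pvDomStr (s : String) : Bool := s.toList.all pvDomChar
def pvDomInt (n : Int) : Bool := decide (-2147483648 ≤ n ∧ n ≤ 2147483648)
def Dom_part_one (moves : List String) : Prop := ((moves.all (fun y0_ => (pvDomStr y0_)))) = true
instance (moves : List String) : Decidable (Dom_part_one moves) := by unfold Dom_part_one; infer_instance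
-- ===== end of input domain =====

-- B replaces A's incremental visit-count dict by a delta table, materialising the full
-- position sequence, then sorting it and counting run boundaries (objective: alternative).


-- ===== PORT A =====
-- one loop iteration of A: the four direction ifs, then the visited-dict update
def pvStepA (st : Int × Int × PySem.Dict (Int × Int) Int) (move : String) :
    Int × Int × PySem.Dict (Int × Int) Int :=
  let loc_x := st.1
  let loc_y := st.2.1
  let visited := st.2.2
  let loc_y := if move = "^" then loc_y + 1 else loc_y
  let loc_y := if move = "v" then loc_y - 1 else loc_y
  let loc_x := if move = ">" then loc_x + 1 else loc_x
  let loc_x := if move = "<" then loc_x - 1 else loc_x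
  let key := (loc_x, loc_y)
  let visited :=
    if visited.contains key then visited.modify key 0 (· + 1)
    else visited.insert key 1
  (loc_x, loc_y, visited)

def part_one (moves : List String) : Int :=
  let st := moves.foldl pvStepA (1, 1, PySem.Dict.empty.insert (1, 1) 1)
  (st.2.2.size : Int)

-- ===== PORT B =====
def pvDelta : PySem.Dict String (Int × Int) :=
  PySem.Dict.ofList [("^", (0, 1)), ("v", (0, -1)), (">", (1, 0)), ("<", (-1, 0))]

-- one iteration of B's position loop: pts.append((pts[-1][0] + dx, pts[-1][1] + dy))
def pvAppendStep (pts : List (Int × Int)) (d : Int × Int) : List (Int × Int) :=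
  pts ++ [((pts.getLastD (1, 1)).1 + d.1, (pts.getLastD (1, 1)).2 + d.2)]

def part_one_alt (moves : List String) : Int :=
  let deltas := moves.map (fun m => pvDelta.getD m (0, 0))
  let pts := deltas.foldl pvAppendStep [(1, 1)]
  let spts := PySem.List.sorted2 pts Prod.fst Prod.snd
  1 + (((spts.zip (spts.drop 1)).countP (fun pq => pq.1 != pq.2) : Nat) : Int)

-- ===== PRECONDITION & SPEC =====
def Spec_part_one (moves : List String) (out : Int) : Prop := out = part_one_alt moves
instance (moves : List String) (out : Int) : Decidable (Spec_part_one moves out) := by unfold Spec_part_one; infer_instance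

-- ===== CLAIM (what is proved, stated in full; the proofs are below) =====
def Claim_equal_part_one : Prop := ∀ (moves : List String), Dom_part_one moves → Spec_part_one moves (part_one moves)

-- ===== LEMMAS AND PROOFS =====

-- the delta table as an if-chain (for reasoning about an arbitrary move string)
theorem pvDelta_getD (m : String) :
    pvDelta.getD m (0, 0)
      = if m = "^" then ((0 : Int), (1 : Int)) else if m = "v" then (0, -1)
        else if m = ">" then (1, 0) else if m = "<" then (-1, 0) else (0, 0) := by
  have hit : pvDelta.items = [("^", (0, 1)), ("v", (0, -1)), (">", (1, 0)), ("<", (-1, 0))] := by decide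
  by_cases h1 : m = "^"
  · subst h1; decide
  · by_cases h2 : m = "v"
    · subst h2; decide
    · by_cases h3 : m = ">"
      · subst h3; decide
      · by_cases h4 : m = "<"
        · subst h4; decide
        · simp only [if_neg h1, if_neg h2, if_neg h3, if_neg h4,
            PySem.Dict.getD, PySem.Dict.get?, hit, List.find?]
          have b1 : (("^" : String) == m) = false := beq_eq_false_iff_ne.mpr (fun h => h1 h.symm)
          have b2 : (("v" : String) == m) = false := beq_eq_false_iff_ne.mpr (fun h => h2 h.symm)
          have b3 : ((">" : String) == m) = false := beq_eq_false_iff_ne.mpr (fun h => h3 h.symm)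
          have b4 : (("<" : String) == m) = false := beq_eq_false_iff_ne.mpr (fun h => h4 h.symm)
          simp [b1, b2, b3, b4]

-- A's four sequential ifs compute exactly B's delta-table move
theorem pvStep_pos (m : String) (x y : Int) :
    ((if m = "<" then (if m = ">" then x + 1 else x) - 1 else (if m = ">" then x + 1 else x)),
     (if m = "v" then (if m = "^" then y + 1 else y) - 1 else (if m = "^" then y + 1 else y)))
      = (x + (pvDelta.getD m (0, 0)).1, y + (pvDelta.getD m (0, 0)).2) := by
  rw [pvDelta_getD]
  by_cases h1 : m = "^"
  · subst h1; simp
  · by_cases h2 : m = "v"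
    · subst h2; simp; omega
    · by_cases h3 : m = ">"
      · subst h3; simp
      · by_cases h4 : m = "<"
        · subst h4; simp; omega
        · simp [h1, h2, h3, h4]

-- loop invariant: A's dict keys are the distinct elements of B's position list, and the
-- (x,y) state is the last position of the list
theorem pv_loop (moves : List String) :
    ∀ (x y : Int) (v : PySem.Dict (Int × Int) Int) (pts : List (Int × Int)),
      pts.getLastD (1, 1) = (x, y) → v.keys = PySem.Set.ofList pts →
      ((moves.map (fun m => pvDelta.getD m (0, 0))).foldl pvAppendStep pts).getLastD (1, 1)
          = ((moves.foldl pvStepA (x, y, v)).1, (moves.foldl pvStepA (x, y, v)).2.1) ∧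
      (moves.foldl pvStepA (x, y, v)).2.2.keys
          = PySem.Set.ofList ((moves.map (fun m => pvDelta.getD m (0, 0))).foldl pvAppendStep pts) := by
  induction moves with
  | nil => intro x y v pts h hk; exact ⟨h, hk⟩
  | cons m rest ih =>
    intro x y v pts h hk
    have hpos := pvStep_pos m x y
    have hx : ((if m = "<" then (if m = ">" then x + 1 else x) - 1 else (if m = ">" then x + 1 else x))) = x + (pvDelta.getD m (0, 0)).1 := congrArg Prod.fst hpos
    have hy : ((if m = "v" then (if m = "^" then y + 1 else y) - 1 else (if m = "^" then y + 1 else y))) = y + (pvDelta.getD m (0, 0)).2 := congrArg Prod.snd hpos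
    simp only [List.map_cons, List.foldl_cons]
    have happ : pvAppendStep pts (pvDelta.getD m (0, 0))
        = pts ++ [(x + (pvDelta.getD m (0, 0)).1, y + (pvDelta.getD m (0, 0)).2)] := by
      simp only [pvAppendStep, h]
    have hkey : ∀ (key : Int × Int),
        (if v.contains key then v.modify key 0 (· + 1) else v.insert key 1).keys
          = PySem.Set.ofList (pts ++ [key]) := by
      intro key
      rw [PySem.Set.ofList_append_singleton, ← hk]
      by_cases hc : v.contains key = true
      · rw [if_pos hc, PySem.Dict.keys_modify,
          PySem.Dict.keys_insert_of_contains v _ hc,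
          PySem.Set.add_of_mem ((PySem.Dict.contains_iff_mem_keys v key).mp hc)]
      · rw [if_neg hc, PySem.Dict.keys_insert_of_not_contains v 1 (by simpa using hc),
          PySem.Set.add_of_not_mem (fun hm => hc ((PySem.Dict.contains_iff_mem_keys v key).mpr hm))]
    have := ih (x + (pvDelta.getD m (0, 0)).1) (y + (pvDelta.getD m (0, 0)).2)
      (if v.contains (x + (pvDelta.getD m (0, 0)).1, y + (pvDelta.getD m (0, 0)).2) then
         v.modify (x + (pvDelta.getD m (0, 0)).1, y + (pvDelta.getD m (0, 0)).2) 0 (· + 1)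
       else v.insert (x + (pvDelta.getD m (0, 0)).1, y + (pvDelta.getD m (0, 0)).2) 1)
      (pts ++ [(x + (pvDelta.getD m (0, 0)).1, y + (pvDelta.getD m (0, 0)).2)])
      (by simp) (hkey _)
    rw [happ]
    simpa [pvStepA, hx, hy] using this

-- Python's tuple sort IS the sort by the lexicographic key
theorem pv_sorted2_eq_sorted (pts : List (Int × Int)) :
    PySem.List.sorted2 pts Prod.fst Prod.snd
      = PySem.List.sorted pts (fun p => (toLex p : Lex (Int × Int))) := by
  have hfun : (fun (a b : Int × Int) =>
        decide (a.1 < b.1) || (!decide (b.1 < a.1) && decide (a.2 < b.2)))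
      = (fun (a b : Int × Int) => decide ((toLex a : Lex (Int × Int)) < toLex b)) := by
    funext a b
    rcases lt_trichotomy a.1 b.1 with h | h | h <;>
      · simp [Prod.Lex.lt_iff, h]
        try omega
  simp only [PySem.List.sorted2, PySem.List.sorted, if_neg (by decide : ¬ (false = true))]
  rw [hfun]

-- distinct count of a list is the toFinset cardinality
theorem pv_ofList_len (l : List (Int × Int)) :
    (PySem.Set.ofList l).length = l.toFinset.card := by
  have h1 : (PySem.Set.ofList l).toFinset = l.toFinset := by
    ext x; simp [PySem.Set.mem_ofList]
  rw [← h1, List.toFinset_card_of_nodup (PySem.Set.nodup_ofList l)]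

-- on a key-sorted list, the number of distinct elements is 1 + number of run boundaries
theorem pv_runs_count : ∀ (s : List (Int × Int)),
    s.Pairwise (fun a b => (toLex a : Lex (Int × Int)) ≤ toLex b) →
    s.toFinset.card
      = if s = [] then 0 else 1 + (s.zip (s.drop 1)).countP (fun pq => pq.1 != pq.2) := by
  intro s
  induction s with
  | nil => intro _; simp
  | cons a t ih =>
    intro hp
    cases t with
    | nil => simp
    | cons b t' =>
      have hrel := (List.pairwise_cons.mp hp).1
      have htail := (List.pairwise_cons.mp hp).2
      have hab := hrel b (by simp)
      have hih := ih htail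
      rw [if_neg (by simp)] at hih
      rw [if_neg (by simp)]
      simp only [List.drop_one, List.tail_cons, List.zip_cons_cons, List.countP_cons] at hih ⊢
      by_cases he : a = b
      · subst he
        have hff : (a != a) = false := by simp
        rw [hff]
        simp only [List.toFinset_cons, Finset.insert_idem] at hih ⊢
        simpa using hih
      · have hlt : (toLex a : Lex (Int × Int)) < toLex b :=
          lt_of_le_of_ne hab (fun hq => he (toLex.injective hq))
        have hnotmem : a ∉ (b :: t') := by
          intro hm
          rcases List.mem_cons.mp hm with h' | h'
          · exact he h'
          · have hbc := (List.pairwise_cons.mp htail).1 a h'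
            exact absurd (lt_of_lt_of_le hlt hbc) (lt_irrefl _)
        have hcard : (a :: b :: t').toFinset.card = 1 + (b :: t').toFinset.card := by
          rw [List.toFinset_cons, Finset.card_insert_of_notMem (by simpa using hnotmem)]
          omega
        have htt : (a != b) = true := by simpa using he
        rw [hcard, hih, htt]
        simp
        omega


-- B's position loop never empties the list
theorem pv_fold_ne_nil : ∀ (ds : List (Int × Int)) (pts : List (Int × Int)),
    pts ≠ [] → ds.foldl pvAppendStep pts ≠ [] := by
  intro ds
  induction ds with
  | nil => intro pts h; simpa using h
  | cons d rest ih =>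
    intro pts _
    simp only [List.foldl_cons]
    exact ih _ (by simp [pvAppendStep])

-- ===== VERDICT (by name: the statement is the Claim_ definition above) =====
theorem part_one_spec : Claim_equal_part_one := by
  intro moves _
  unfold Spec_part_one part_one part_one_alt
  have h := pv_loop moves 1 1 (PySem.Dict.empty.insert (1, 1) 1) [(1, 1)] rfl (by decide)
  have hkeys := h.2
  set dl := moves.map (fun m => pvDelta.getD m (0, 0)) with hdl
  set pts := dl.foldl pvAppendStep [(1, 1)] with hpts
  have hne : pts ≠ [] := pv_fold_ne_nil dl [(1, 1)] (by simp)
  -- A's result is the distinct count of pts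
  have hA : ((moves.foldl pvStepA (1, 1, PySem.Dict.empty.insert (1, 1) 1)).2.2.size : Int)
      = ((PySem.Set.ofList pts).length : Int) := by
    simp only [PySem.Dict.size, PySem.Dict.keys] at hkeys ⊢
    rw [show ((moves.foldl pvStepA (1, 1, PySem.Dict.empty.insert (1, 1) 1)).2.2.items.length)
        = ((moves.foldl pvStepA (1, 1, PySem.Dict.empty.insert (1, 1) 1)).2.2.items.map Prod.fst).length
        from (List.length_map _).symm, hkeys]
  -- B's result is the same distinct count, via the sorted run decomposition
  set spts := PySem.List.sorted2 pts Prod.fst Prod.snd with hspts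
  have hsort : spts = PySem.List.sorted pts (fun p => (toLex p : Lex (Int × Int))) :=
    pv_sorted2_eq_sorted pts
  have hperm : spts.Perm pts := by rw [hsort]; exact PySem.List.sorted_perm pts _ false
  have hpw : spts.Pairwise (fun a b => (toLex a : Lex (Int × Int)) ≤ toLex b) := by
    rw [hsort]; exact PySem.List.sorted_pairwise pts _
  have hsne : spts ≠ [] := by
    rw [hsort]; exact fun hq => hne ((PySem.List.sorted_eq_nil_iff pts _ false).mp hq)
  have hfin : pts.toFinset = spts.toFinset := (List.toFinset_eq_of_perm _ _ hperm).symm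
  rw [hA, pv_ofList_len, hfin]
  rw [pv_runs_count spts hpw, if_neg hsne]
  push_cast
  ring
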